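-- pv_equiv track=rewrite | github.com/abhisaini/RL-GUI | compare.py | compPath
-- ===== SOURCE A (Python) =====
-- def compPath(coords, optCoords):
--     total_dist = 0
--     for point in coords:
--         mdist = 20
--         for optpt in optCoords:
--             tmp_dist = (optpt[0] - point[0]) + (optpt[1] - point[1])
--             if tmp_dist < mdist:
--                 mdist = tmp_dist
--         total_dist += mdist
--     return total_dist
-- ===== SOURCE B (Python) =====
-- def compPath(coords, optCoords):
--     if not optCoords:
--         return 20 * len(coords)
--     m = min(ox + oy for ox, oy in optCoords)
--     return sum(min(20, m - (px + py)) for px, py in coords)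
-- ===== Notes on version B (the rewrite author's own statement) =====
-- stated objective: faster
-- what changed: B precomputes m = min(ox+oy) over optCoords once, then a single pass sums min(20, m - (px+py)) per point, replacing A's nested per-point scan of optCoords.
import Mathlib
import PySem

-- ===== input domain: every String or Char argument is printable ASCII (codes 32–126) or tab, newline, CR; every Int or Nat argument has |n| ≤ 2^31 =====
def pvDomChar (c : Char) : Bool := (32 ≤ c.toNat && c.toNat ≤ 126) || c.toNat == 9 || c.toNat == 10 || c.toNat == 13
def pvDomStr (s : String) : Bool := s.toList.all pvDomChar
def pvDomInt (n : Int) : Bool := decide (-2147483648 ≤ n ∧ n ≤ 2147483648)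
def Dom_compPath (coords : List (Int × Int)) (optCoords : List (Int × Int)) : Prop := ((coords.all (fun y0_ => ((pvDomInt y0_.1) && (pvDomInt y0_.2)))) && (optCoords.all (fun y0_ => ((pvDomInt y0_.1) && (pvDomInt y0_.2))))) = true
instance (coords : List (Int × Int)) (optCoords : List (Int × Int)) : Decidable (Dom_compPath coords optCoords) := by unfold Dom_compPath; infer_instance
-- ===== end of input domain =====

-- B replaces A's nested O(n·m) scan by precomputing min(ox+oy) once and a single capped-min pass (objective: faster, asymptotic).

-- ===== PORT A =====
-- inner loop: mdist starts at 20, updated whenever tmp_dist < mdist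
def compPathInner (point : Int × Int) (optCoords : List (Int × Int)) : Int :=
  optCoords.foldl
    (fun mdist optpt =>
      if (optpt.1 - point.1) + (optpt.2 - point.2) < mdist
      then (optpt.1 - point.1) + (optpt.2 - point.2) else mdist)
    20

def compPath (coords : List (Int × Int)) (optCoords : List (Int × Int)) : Int :=
  coords.foldl (fun total_dist point => total_dist + compPathInner point optCoords) 0

-- ===== PORT B =====
def compPath_alt (coords : List (Int × Int)) (optCoords : List (Int × Int)) : Int :=
  match optCoords with
  | [] => 20 * coords.length
  | o :: os =>
    let m := os.foldl (fun a p => min a (p.1 + p.2)) (o.1 + o.2)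
    coords.foldl (fun s p => s + min 20 (m - (p.1 + p.2))) 0

-- ===== PRECONDITION & SPEC =====
def Spec_compPath (coords : List (Int × Int)) (optCoords : List (Int × Int)) (out : Int) : Prop := out = compPath_alt coords optCoords
instance (coords : List (Int × Int)) (optCoords : List (Int × Int)) (out : Int) : Decidable (Spec_compPath coords optCoords out) := by unfold Spec_compPath; infer_instance

-- ===== CLAIM (what is proved, stated in full; the proofs are below) =====
def Claim_equal_compPath : Prop := ∀ (coords : List (Int × Int)) (optCoords : List (Int × Int)), Dom_compPath coords optCoords → Spec_compPath coords optCoords (compPath coords optCoords)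

-- ===== LEMMAS AND PROOFS =====

theorem foldl_ptwise {α β : Type} (l : List β) (f g : α → β → α)
    (h : ∀ a b, f a b = g a b) : ∀ a, l.foldl f a = l.foldl g a := by
  induction l with
  | nil => intro a; rfl
  | cons x xs ih => intro a; simp only [List.foldl_cons, h, ih]

-- A's if-update inner fold is a min-fold
theorem innerFold_min (point : Int × Int) (os : List (Int × Int)) :
    ∀ a : Int,
      os.foldl
        (fun mdist optpt =>
          if (optpt.1 - point.1) + (optpt.2 - point.2) < mdist
          then (optpt.1 - point.1) + (optpt.2 - point.2) else mdist) a
      = os.foldl (fun a p => min a ((p.1 - point.1) + (p.2 - point.2))) a := by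
  induction os with
  | nil => intro a; rfl
  | cons o os ih =>
    intro a
    simp only [List.foldl_cons, ih]
    congr 1
    by_cases h : (o.1 - point.1) + (o.2 - point.2) < a <;> simp [min_def] <;> omega

-- shifting a min-fold by a constant
theorem minFold_shift (os : List (Int × Int)) (s : Int) :
    ∀ a : Int,
      os.foldl (fun a p => min a ((p.1 + p.2) - s)) a
      = os.foldl (fun a p => min a (p.1 + p.2)) (a + s) - s := by
  induction os with
  | nil => intro a; simp only [List.foldl_nil]; omega
  | cons o os ih =>
    intro a
    simp only [List.foldl_cons, ih]
    congr 2
    omega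

-- pulling a min out of the initial accumulator
theorem minFold_init (os : List (Int × Int)) :
    ∀ c i : Int,
      os.foldl (fun a p => min a (p.1 + p.2)) (min c i)
      = min c (os.foldl (fun a p => min a (p.1 + p.2)) i) := by
  induction os with
  | nil => intro c i; rfl
  | cons o os ih =>
    intro c i
    simp only [List.foldl_cons, min_assoc, ih]

theorem inner_eq (point : Int × Int) (o : Int × Int) (os : List (Int × Int)) :
    compPathInner point (o :: os)
      = min 20 (os.foldl (fun a p => min a (p.1 + p.2)) (o.1 + o.2) - (point.1 + point.2)) := by
  unfold compPathInner
  rw [innerFold_min]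
  rw [foldl_ptwise _ _ (fun a p => min a ((p.1 + p.2) - (point.1 + point.2)))
      (by intro a p; congr 1; omega)]
  simp only [List.foldl_cons]
  rw [minFold_shift]
  rw [show min 20 (o.1 + o.2 - (point.1 + point.2)) + (point.1 + point.2)
        = min (20 + (point.1 + point.2)) (o.1 + o.2) by simp [min_def]; split_ifs <;> omega]
  rw [minFold_init]
  generalize os.foldl (fun a p => min a (p.1 + p.2)) (o.1 + o.2) = q
  simp only [min_def]
  split_ifs <;> omega

theorem foldl_const20 (coords : List (Int × Int)) :
    ∀ a : Int, coords.foldl (fun total_dist _ => total_dist + 20) a = a + 20 * coords.length := by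
  induction coords with
  | nil => intro a; simp
  | cons c cs ih => intro a; simp only [List.foldl_cons, ih, List.length_cons]; push_cast; ring

-- ===== VERDICT (by name: the statement is the Claim_ definition above) =====
theorem compPath_spec : Claim_equal_compPath := by
  intro coords optCoords _
  unfold Spec_compPath compPath compPath_alt
  cases optCoords with
  | nil =>
    simp only [compPathInner, List.foldl_nil]
    simpa using foldl_const20 coords 0
  | cons o os =>
    exact foldl_ptwise coords _ _ (fun a p => by rw [inner_eq]) 0
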